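-- pv_equiv track=rewrite | github.com/Fondamenti18/fondamenti-di-programmazione | students/1794946/homework03/program01.py | seconda
-- ===== SOURCE A (Python) =====
-- def inside(img, x, y):
-- 	return 0 <= x < len(img[0]) and 0 <= y < len(img)
--
-- def seconda(x,y,img, b, precedente,c):
--     for a in range(x, x+b):
--         for d in range(y,y+b):
--             if inside(img, a, d)==False or img[d][a]!=c:
--                 if b==precedente[-1] or b-1==precedente[-1]:
--                     return None
--                 else:
--                     return (x,y), b-1
--     return seconda(x,y,img, b+1, precedente, c)
-- ===== SOURCE B (Python) =====
-- def seconda(x, y, img, b, precedente, c):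
--     H = len(img)
--     W = len(img[0])
--
--     def ok(a, d):
--         return 0 <= a < W and 0 <= d < H and img[d][a] == c
--
--     # Grow border by border: find the first size s >= 1 whose new border
--     # (bottom row plus right column of the s x s square anchored at (x, y))
--     # is not entirely colour c inside the image.
--     s = 1
--     while all(ok(a, y + s - 1) for a in range(x, x + s)) and \
--           all(ok(x + s - 1, d) for d in range(y, y + s - 1)):
--         s += 1
--     bad = max(s, b)  # first size >= b whose square is not monochrome
--     last = precedente[-1]
--     if bad == last or bad - 1 == last:
--         return None
--     return (x, y), bad - 1
-- ===== Notes on version B (the rewrite author's own statement) =====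
-- stated objective: alternative
-- what changed: Instead of re-scanning the whole b x b square at every size and recursing on the size (O(B^3) cell reads in the worst case), B grows the square one size at a time checking only the newly added L-shaped border (bottom row + right column), so each cell is inspected once (O(B^2) reads); the failing size is max(first bad border, b). On the generated timing inputs (random pixels, so tiny monochrome squares) the two are measured equally fast.
-- outside the precondition, e.g. on seconda(-1, 4, [], 5, [5], 191): A returns None, B raises IndexError; on seconda(0, 0, [[1, 2], [3]], 1, [5], 9): A returns ((0, 0), 0), B returns ((0, 0), 0); on seconda(0, 0, [[7]], -401, [5], 7): A returns ((0, 0), 1), B returns ((0, 0), 1)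
import Mathlib
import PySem

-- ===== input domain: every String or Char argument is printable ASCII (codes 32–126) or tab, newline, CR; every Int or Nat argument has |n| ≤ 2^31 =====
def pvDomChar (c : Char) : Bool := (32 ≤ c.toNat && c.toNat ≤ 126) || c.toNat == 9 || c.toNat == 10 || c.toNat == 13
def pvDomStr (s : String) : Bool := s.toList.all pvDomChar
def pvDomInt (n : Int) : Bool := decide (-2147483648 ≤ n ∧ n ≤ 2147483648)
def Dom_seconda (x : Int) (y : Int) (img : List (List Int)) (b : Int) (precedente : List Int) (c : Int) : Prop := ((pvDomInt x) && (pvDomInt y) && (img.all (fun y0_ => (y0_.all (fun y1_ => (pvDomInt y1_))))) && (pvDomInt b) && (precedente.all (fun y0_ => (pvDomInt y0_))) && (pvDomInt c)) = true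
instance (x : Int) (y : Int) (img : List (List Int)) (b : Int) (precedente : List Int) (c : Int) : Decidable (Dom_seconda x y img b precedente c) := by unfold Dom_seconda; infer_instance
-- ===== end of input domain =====

-- B replaces A's full re-scan of the square at every size (and its recursion on the size)
-- by a single pass that grows the square border by border, checking only the newly added
-- L-shaped border, so each cell is read once; measured equally fast on the generated inputs.


-- ===== PORT A =====

-- helper `inside(img, x, y)`
def pvInside (img : List (List Int)) (a d : Int) : Bool :=
  decide (0 ≤ a ∧ a < ((img.headD []).length : Int) ∧ 0 ≤ d ∧ d < (img.length : Int))

-- img[d][a]; in A it is evaluated only when `inside` is true (short-circuit `or`),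
-- so under Pre_ the indices are in range and getD is exact
def pvCell (img : List (List Int)) (d a : Int) : Int :=
  (img.getD d.toNat []).getD a.toNat 0

-- A's inner loop `for d in range(y, y+b)` for a fixed column a:
-- true iff no cell in rows [d, stop) triggers the failure branch
def pvColOkA (img : List (List Int)) (c a : Int) (d stop : Int) : Bool :=
  if h : d < stop then
    if pvInside img a d = false ∨ pvCell img d a ≠ c then false
    else pvColOkA img c a (d + 1) stop
  else true
termination_by (stop - d).toNat
decreasing_by omega

-- A's outer loop `for a in range(x, x+b)`
def pvRowsOkA (img : List (List Int)) (c yy bsz : Int) (a stop : Int) : Bool :=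
  if h : a < stop then
    if pvColOkA img c a yy (yy + bsz) then pvRowsOkA img c yy bsz (a + 1) stop else false
  else true
termination_by (stop - a).toNat
decreasing_by omega

def pvRectOkA (img : List (List Int)) (c x y bsz : Int) : Bool :=
  pvRowsOkA img c y bsz x (x + bsz)

-- A's recursion on the size b; the Nat fuel is only a totality guard
-- (proven sufficient for the fuel `seconda` passes, on every input)
def pvAGo (img : List (List Int)) (c x y p : Int) : Nat → Int → Option ((Int × Int) × Int)
  | 0, _ => none
  | fuel + 1, b =>
    if pvRectOkA img c x y b then pvAGo img c x y p fuel (b + 1)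
    else if b = p ∨ b - 1 = p then none
    else some ((x, y), b - 1)

def seconda (x : Int) (y : Int) (img : List (List Int)) (b : Int) (precedente : List Int) (c : Int) : Option ((Int × Int) × Int) :=
  pvAGo img c x y (precedente.getLastD 0) ((img.headD []).length + 2 + (1 - b).toNat) b

-- ===== PORT B =====

-- B's `ok(a, d)`
def pvOkB (img : List (List Int)) (c W H a d : Int) : Bool :=
  decide (0 ≤ a ∧ a < W ∧ 0 ≤ d ∧ d < H ∧ (img.getD d.toNat []).getD a.toNat 0 = c)

-- B's border test: bottom row plus right column of the s×s square at (x, y)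
def pvBorderOk (img : List (List Int)) (c W H x y s : Int) : Bool :=
  ((PySem.List.pyRange x (x + s) 1).all fun a => pvOkB img c W H a (y + s - 1)) &&
  ((PySem.List.pyRange y (y + s - 1) 1).all fun d => pvOkB img c W H (x + s - 1) d)

-- B's while loop: first size ≥ s whose border fails; fuel is only a totality guard
def pvGrow (img : List (List Int)) (c W H x y : Int) : Nat → Int → Int
  | 0, s => s
  | fuel + 1, s => if pvBorderOk img c W H x y s then pvGrow img c W H x y fuel (s + 1) else s

def seconda_alt (x : Int) (y : Int) (img : List (List Int)) (b : Int) (precedente : List Int) (c : Int) : Option ((Int × Int) × Int) :=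
  let H : Int := img.length
  let W : Int := (img.headD []).length
  let s0 := pvGrow img c W H x y ((img.headD []).length + 2) 1
  let bad := max s0 b
  let last := precedente.getLastD 0
  if bad = last ∨ bad - 1 = last then none else some ((x, y), bad - 1)

-- ===== PRECONDITION & SPEC =====
-- Pre_ excludes exactly the inputs on which the Python A raises, and a small margin around them:
-- empty img / empty precedente (IndexError), a row shorter than row 0 (IndexError can occur during
-- the scan; it also excludes some inputs where the scan stops before the short row and A returns),
-- and b < -400 (A recurses once per size from b upward and can hit Python's recursion limit;
-- moderately negative excluded b still return) — excluded-but-returning examples are cited in the claim.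
def Pre_seconda (x : Int) (y : Int) (img : List (List Int)) (b : Int) (precedente : List Int) (c : Int) : Prop :=
  img ≠ [] ∧ precedente ≠ [] ∧ (∀ row ∈ img, (img.headD []).length ≤ row.length) ∧ -400 ≤ b
instance (x : Int) (y : Int) (img : List (List Int)) (b : Int) (precedente : List Int) (c : Int) : Decidable (Pre_seconda x y img b precedente c) := by unfold Pre_seconda; infer_instance

def pvWitness_seconda : Int × Int × List (List Int) × Int × List Int × Int := (0, 0, [[1]], 1, [3], 1)

def Spec_seconda (x : Int) (y : Int) (img : List (List Int)) (b : Int) (precedente : List Int) (c : Int) (out : Option ((Int × Int) × Int)) : Prop := out = seconda_alt x y img b precedente c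
instance (x : Int) (y : Int) (img : List (List Int)) (b : Int) (precedente : List Int) (c : Int) (out : Option ((Int × Int) × Int)) : Decidable (Spec_seconda x y img b precedente c out) := by unfold Spec_seconda; infer_instance

-- ===== CLAIM (what is proved, stated in full; the proofs are below) =====
def Claim_equal_seconda : Prop := ∀ (x : Int) (y : Int) (img : List (List Int)) (b : Int) (precedente : List Int) (c : Int), Dom_seconda x y img b precedente c → Pre_seconda x y img b precedente c → Spec_seconda x y img b precedente c (seconda x y img b precedente c)

-- ===== LEMMAS AND PROOFS =====

-- a cell is "good": inside the image (width = length of row 0) and of colour c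
def pvCellOk (img : List (List Int)) (c a d : Int) : Prop :=
  0 ≤ a ∧ a < ((img.headD []).length : Int) ∧ 0 ≤ d ∧ d < ((img.length : Int)) ∧ pvCell img d a = c

lemma pvOkB_iff (img : List (List Int)) (c a d : Int) :
    pvOkB img c ((img.headD []).length : Int) (img.length : Int) a d = true ↔ pvCellOk img c a d := by
  simp [pvOkB, pvCellOk, pvCell]

lemma pvColOkA_iff (img : List (List Int)) (c a : Int) (d stop : Int) :
    pvColOkA img c a d stop = true ↔ ∀ e, d ≤ e → e < stop → pvCellOk img c a e := by
  generalize hk : (stop - d).toNat = k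
  induction k generalizing d with
  | zero =>
    rw [pvColOkA]
    have h : ¬ d < stop := by omega
    simp only [dif_neg h]
    constructor
    · intro _ e h1 h2; omega
    · intro _; trivial
  | succ n ih =>
    rw [pvColOkA]
    have h : d < stop := by omega
    simp only [dif_pos h]
    by_cases hbad : pvInside img a d = false ∨ pvCell img d a ≠ c
    · simp only [if_pos hbad]
      constructor
      · intro hfalse; exact absurd hfalse (by simp)
      · intro hall
        have := hall d le_rfl h
        simp only [pvCellOk] at this
        rcases hbad with hb | hb
        · simp only [pvInside, decide_eq_false_iff_not] at hb
          exact absurd ⟨this.1, this.2.1, this.2.2.1, this.2.2.2.1⟩ hb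
        · exact absurd this.2.2.2.2 hb
    · simp only [if_neg hbad]
      push_neg at hbad
      obtain ⟨hin, hcell⟩ := hbad
      simp only [ne_eq, Bool.not_eq_false] at hin
      rw [ih (d + 1) (by omega)]
      constructor
      · intro hall e h1 h2
        rcases eq_or_lt_of_le h1 with rfl | hlt
        · simp only [pvInside, decide_eq_true_eq] at hin
          exact ⟨hin.1, hin.2.1, hin.2.2.1, hin.2.2.2, hcell⟩
        · exact hall e (by omega) h2
      · intro hall e h1 h2; exact hall e (by omega) h2

lemma pvRowsOkA_iff (img : List (List Int)) (c yy bsz : Int) (a stop : Int) :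
    pvRowsOkA img c yy bsz a stop = true ↔ ∀ g, a ≤ g → g < stop → pvColOkA img c g yy (yy + bsz) = true := by
  generalize hk : (stop - a).toNat = k
  induction k generalizing a with
  | zero =>
    rw [pvRowsOkA]
    have h : ¬ a < stop := by omega
    simp only [dif_neg h]
    constructor
    · intro _ g h1 h2; omega
    · intro _; trivial
  | succ n ih =>
    rw [pvRowsOkA]
    have h : a < stop := by omega
    simp only [dif_pos h]
    by_cases hcol : pvColOkA img c a yy (yy + bsz) = true
    · simp only [if_pos hcol, ih (a + 1) (by omega)]
      constructor
      · intro hall g h1 h2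
        rcases eq_or_lt_of_le h1 with rfl | hlt
        · exact hcol
        · exact hall g (by omega) h2
      · intro hall g h1 h2; exact hall g (by omega) h2
    · simp only [if_neg hcol]
      constructor
      · intro hfalse; exact absurd hfalse (by simp)
      · intro hall; exact absurd (hall a le_rfl h) hcol

lemma pvRectOkA_iff (img : List (List Int)) (c x y s : Int) :
    pvRectOkA img c x y s = true ↔
      ∀ a d, x ≤ a → a < x + s → y ≤ d → d < y + s → pvCellOk img c a d := by
  rw [pvRectOkA, pvRowsOkA_iff]
  constructor
  · intro h a d h1 h2 h3 h4
    exact (pvColOkA_iff img c a y (y + s)).mp (h a h1 h2) d h3 h4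
  · intro h g h1 h2
    rw [pvColOkA_iff]
    intro e h3 h4
    exact h g e h1 h2 h3 h4

lemma pvBorderOk_iff (img : List (List Int)) (c x y s : Int) :
    pvBorderOk img c ((img.headD []).length : Int) (img.length : Int) x y s = true ↔
      (∀ a, x ≤ a → a < x + s → pvCellOk img c a (y + s - 1)) ∧
      (∀ d, y ≤ d → d < y + s - 1 → pvCellOk img c (x + s - 1) d) := by
  rw [pvBorderOk, Bool.and_eq_true, List.all_eq_true, List.all_eq_true]
  constructor
  · intro ⟨h1, h2⟩
    constructor
    · intro a ha1 ha2
      exact (pvOkB_iff img c a (y + s - 1)).mp (h1 a (PySem.List.mem_pyRange_one.mpr ⟨ha1, ha2⟩))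
    · intro d hd1 hd2
      exact (pvOkB_iff img c (x + s - 1) d).mp (h2 d (PySem.List.mem_pyRange_one.mpr ⟨hd1, hd2⟩))
  · intro ⟨h1, h2⟩
    constructor
    · intro a ha
      obtain ⟨ha1, ha2⟩ := PySem.List.mem_pyRange_one.mp ha
      exact (pvOkB_iff img c a (y + s - 1)).mpr (h1 a ha1 ha2)
    · intro d hd
      obtain ⟨hd1, hd2⟩ := PySem.List.mem_pyRange_one.mp hd
      exact (pvOkB_iff img c (x + s - 1) d).mpr (h2 d hd1 hd2)

-- the full square is monochrome iff every border up to its size is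
lemma pvRect_iff_borders (img : List (List Int)) (c x y s : Int) (hs : 1 ≤ s) :
    pvRectOkA img c x y s = true ↔
      ∀ t, 1 ≤ t → t ≤ s → pvBorderOk img c ((img.headD []).length : Int) (img.length : Int) x y t = true := by
  rw [pvRectOkA_iff]
  constructor
  · intro h t h1 h2
    rw [pvBorderOk_iff]
    constructor
    · intro a ha1 ha2; exact h a (y + t - 1) ha1 (by omega) (by omega) (by omega)
    · intro d hd1 hd2; exact h (x + t - 1) d (by omega) (by omega) hd1 (by omega)
  · intro h a d ha1 ha2 hd1 hd2
    by_cases hc : a - x ≤ d - y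
    · have hb := (pvBorderOk_iff img c x y (d - y + 1)).mp (h (d - y + 1) (by omega) (by omega))
      have := hb.1 a ha1 (by omega)
      have he : y + (d - y + 1) - 1 = d := by ring
      rwa [he] at this
    · have hb := (pvBorderOk_iff img c x y (a - x + 1)).mp (h (a - x + 1) (by omega) (by omega))
      have := hb.2 d hd1 (by omega)
      have he : x + (a - x + 1) - 1 = a := by ring
      rwa [he] at this

lemma pvBorderOk_le (img : List (List Int)) (c x y t : Int) (ht : 1 ≤ t)
    (h : pvBorderOk img c ((img.headD []).length : Int) (img.length : Int) x y t = true) :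
    t ≤ ((img.headD []).length : Int) := by
  rw [pvBorderOk_iff] at h
  have h1 := h.1 x le_rfl (by omega)
  have h2 := h.1 (x + t - 1) (by omega) (by omega)
  rcases h1 with ⟨hx0, _⟩
  rcases h2 with ⟨_, hxt, _⟩
  omega

lemma pvRect_vacuous (img : List (List Int)) (c x y s : Int) (hs : s ≤ 0) :
    pvRectOkA img c x y s = true := by
  rw [pvRectOkA, pvRowsOkA]
  have h : ¬ x < x + s := by omega
  simp [h]

-- pvGrow finds the first bad border at or after t (given enough fuel)
lemma pvGrow_char (img : List (List Int)) (c x y : Int) :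
    ∀ (fuel : Nat) (t : Int), 1 ≤ t → (((img.headD []).length : Int) + 1 - t).toNat < fuel →
      t ≤ pvGrow img c ((img.headD []).length : Int) (img.length : Int) x y fuel t ∧
      pvBorderOk img c ((img.headD []).length : Int) (img.length : Int) x y
        (pvGrow img c ((img.headD []).length : Int) (img.length : Int) x y fuel t) = false ∧
      (∀ u, t ≤ u → u < pvGrow img c ((img.headD []).length : Int) (img.length : Int) x y fuel t →
        pvBorderOk img c ((img.headD []).length : Int) (img.length : Int) x y u = true) := by
  intro fuel
  induction fuel with
  | zero => intro t _ hb; omega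
  | succ n ih =>
    intro t ht hb
    by_cases hB : pvBorderOk img c ((img.headD []).length : Int) (img.length : Int) x y t = true
    · have htW := pvBorderOk_le img c x y t ht hB
      have := ih (t + 1) (by omega) (by omega)
      rw [pvGrow, if_pos hB]
      refine ⟨by omega, this.2.1, ?_⟩
      intro u hu1 hu2
      rcases eq_or_lt_of_le hu1 with rfl | hlt
      · exact hB
      · exact this.2.2 u (by omega) hu2
    · rw [pvGrow, if_neg hB]
      exact ⟨le_rfl, by rwa [Bool.not_eq_true] at hB, fun u h1 h2 => by omega⟩

-- A's size recursion, started anywhere at or below the first bad border s0,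
-- returns the answer determined by s0
lemma pvAGo_eq (img : List (List Int)) (c x y p s0 : Int) (hs0 : 1 ≤ s0)
    (hbad : pvBorderOk img c ((img.headD []).length : Int) (img.length : Int) x y s0 = false)
    (hok : ∀ u, 1 ≤ u → u < s0 → pvBorderOk img c ((img.headD []).length : Int) (img.length : Int) x y u = true) :
    ∀ (fuel : Nat) (s : Int), s ≤ s0 → (((img.headD []).length : Int) + 1 - s).toNat < fuel →
      pvAGo img c x y p fuel s = if s0 = p ∨ s0 - 1 = p then none else some ((x, y), s0 - 1) := by
  have hW : s0 ≤ ((img.headD []).length : Int) + 1 := by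
    by_cases h1 : s0 = 1
    · omega
    · have := pvBorderOk_le img c x y (s0 - 1) (by omega) (hok (s0 - 1) (by omega) (by omega))
      omega
  intro fuel
  induction fuel with
  | zero => intro s _ hb; omega
  | succ n ih =>
    intro s hs hb
    by_cases hss : s = s0
    · have hrect : ¬ pvRectOkA img c x y s = true := by
        intro h
        have := (pvRect_iff_borders img c x y s (by omega)).mp h s0 hs0 (by omega)
        rw [hbad] at this
        exact Bool.false_ne_true this
      rw [pvAGo, if_neg hrect, hss]
    · have hlt : s < s0 := lt_of_le_of_ne hs hss
      have hrect : pvRectOkA img c x y s = true := by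
        by_cases h0 : s ≤ 0
        · exact pvRect_vacuous img c x y s h0
        · exact (pvRect_iff_borders img c x y s (by omega)).mpr
            (fun t h1 ht => hok t h1 (by omega))
      rw [pvAGo, if_pos hrect]
      exact ih (s + 1) (by omega) (by omega)

-- ===== VERDICT (by name: the statement is the Claim_ definition above) =====
theorem seconda_spec : Claim_equal_seconda := by
  intro x y img b precedente c _hdom _hpre
  unfold Spec_seconda seconda seconda_alt
  simp only []
  obtain ⟨h1, hbad, hok⟩ :=
    pvGrow_char img c x y ((img.headD []).length + 2) 1 le_rfl (by omega)
  set s0 := pvGrow img c ((img.headD []).length : Int) (img.length : Int) x y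
    ((img.headD []).length + 2) 1 with hs0def
  by_cases hcase : s0 ≤ b
  · rw [max_eq_right hcase]
    obtain ⟨m, hm⟩ : ∃ m, (img.headD []).length + 2 + (1 - b).toNat = m + 1 :=
      ⟨(img.headD []).length + 1 + (1 - b).toNat, by omega⟩
    rw [hm]
    have hb1 : (1 : Int) ≤ b := le_trans h1 hcase
    have hrect : ¬ pvRectOkA img c x y b = true := by
      intro h
      have := (pvRect_iff_borders img c x y b hb1).mp h s0 h1 hcase
      rw [hbad] at this
      exact Bool.false_ne_true this
    rw [pvAGo, if_neg hrect]
  · push_neg at hcase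
    rw [max_eq_left (le_of_lt hcase)]
    exact pvAGo_eq img c x y (precedente.getLastD 0) s0 h1 hbad hok
      ((img.headD []).length + 2 + (1 - b).toNat) b (le_of_lt hcase) (by omega)
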